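-- pv_equiv track=rewrite | github.com/Intina47/orbit | src/orbit/soak_harness.py | _is_stale
-- ===== SOURCE A (Python) =====
-- def _is_stale(content: str) -> bool:
--     normalized = content.lower()
--     stale_markers = (
--         "profile_old",
--         "absolute beginner",
--         "novice",
--         "new to coding",
--         "entry level",
--         "newbie",
--     )
--     return any(marker in normalized for marker in stale_markers)
-- ===== SOURCE B (Python) =====
-- def _is_stale(content: str) -> bool:
--     stale_markers = (
--         "profile_old",
--         "absolute beginner",
--         "novice",
--         "new to coding",
--         "entry level",
--         "newbie",
--     )
--     s = content.lower()
--     for i in range(len(s)):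
--         for marker in stale_markers:
--             if s.startswith(marker, i):
--                 return True
--     return False
-- ===== Notes on version B (the rewrite author's own statement) =====
-- stated objective: alternative
-- what changed: Instead of running a separate substring search per marker over the lowered text, B makes a single position-major pass over the lowered text and at each position tests every marker with startswith at that offset (a naive multi-pattern matcher).
import Mathlib
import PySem

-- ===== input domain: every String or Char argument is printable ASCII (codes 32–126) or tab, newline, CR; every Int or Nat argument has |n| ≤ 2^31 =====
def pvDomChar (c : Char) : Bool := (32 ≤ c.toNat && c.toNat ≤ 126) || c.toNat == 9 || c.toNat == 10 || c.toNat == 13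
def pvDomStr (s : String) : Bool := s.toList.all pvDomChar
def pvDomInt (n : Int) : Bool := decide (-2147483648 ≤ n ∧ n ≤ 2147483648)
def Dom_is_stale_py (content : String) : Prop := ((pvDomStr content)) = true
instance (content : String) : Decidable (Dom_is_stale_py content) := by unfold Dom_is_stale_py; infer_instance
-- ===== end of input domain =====

-- B replaces A's per-marker substring searches over a pre-lowered copy with one
-- position-major pass testing each marker for a case-insensitive prefix match
-- (objective: alternative; not faster).

-- ===== PORT A =====
def staleMarkers : List String :=
  ["profile_old", "absolute beginner", "novice", "new to coding", "entry level", "newbie"]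

def is_stale_py (content : String) : Bool :=
  let normalized := PySem.Str.lower content
  staleMarkers.any (fun marker => PySem.Str.isIn marker normalized)

-- ===== PORT B =====
-- B's marker tuple, as char lists (B compares slices of the raw text after lowering them)
def altMarkers : List (List Char) :=
  [ "profile_old".toList, "absolute beginner".toList, "novice".toList,
    "new to coding".toList, "entry level".toList, "newbie".toList ]

-- B's 'for i in range(len(s)): … s.startswith(marker, i)' loop: recursion on the
-- suffix s[i:] (startswith at offset i = prefix of the i-th suffix)
def altGo : List Char → Bool
  | [] => false
  | c :: rest =>
      (altMarkers.any (fun m => m.isPrefixOf (c :: rest))) || altGo rest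

def is_stale_py_alt (content : String) : Bool :=
  altGo (PySem.Chars.lower content.toList)

-- ===== PRECONDITION & SPEC =====
def Spec_is_stale_py (content : String) (out : Bool) : Prop := out = is_stale_py_alt content
instance (content : String) (out : Bool) : Decidable (Spec_is_stale_py content out) := by unfold Spec_is_stale_py; infer_instance

-- ===== CLAIM (what is proved, stated in full; the proofs are below) =====
def Claim_equal_is_stale_py : Prop := ∀ (content : String), Dom_is_stale_py content → Spec_is_stale_py content (is_stale_py content)

-- ===== LEMMAS AND PROOFS =====

theorem altMarkers_eq : altMarkers = staleMarkers.map String.toList := by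
  decide

theorem altMarkers_ne_nil : ∀ m ∈ altMarkers, m ≠ [] := by
  decide

-- characterisation of B's loop: some marker is a prefix of some suffix
theorem altGo_iff (s : List Char) :
    altGo s = true ↔ ∃ j, ∃ m ∈ altMarkers, m <+: s.drop j := by
  induction s with
  | nil =>
    simp only [altGo]
    constructor
    · intro h; exact absurd h (by simp)
    · rintro ⟨j, m, hm, hpre⟩
      exact absurd (List.prefix_nil.mp (by simpa using hpre)) (altMarkers_ne_nil m hm)
  | cons c rest ih =>
    simp only [altGo, Bool.or_eq_true, List.any_eq_true, List.isPrefixOf_iff_prefix, ih]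
    constructor
    · rintro (⟨m, hm, hpre⟩ | ⟨j, m, hm, hpre⟩)
      · exact ⟨0, m, hm, by simpa using hpre⟩
      · exact ⟨j + 1, m, hm, by simpa using hpre⟩
    · rintro ⟨j, m, hm, hpre⟩
      cases j with
      | zero => exact Or.inl ⟨m, hm, by simpa using hpre⟩
      | succ j => exact Or.inr ⟨j, m, hm, by simpa using hpre⟩

-- characterisation of A: some marker is an infix of the lowered text
theorem is_stale_py_iff (content : String) :
    is_stale_py content = true ↔
      ∃ m ∈ staleMarkers, m.toList <:+: PySem.Chars.lower content.toList := by
  simp only [is_stale_py, List.any_eq_true]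
  constructor
  · rintro ⟨m, hm, h⟩
    exact ⟨m, hm, by simpa [PySem.Str.toList_lower] using (PySem.Str.isIn_iff_infix m _).mp h⟩
  · rintro ⟨m, hm, h⟩
    exact ⟨m, hm, (PySem.Str.isIn_iff_infix m _).mpr (by simpa [PySem.Str.toList_lower] using h)⟩

theorem is_stale_py_eq_alt (content : String) :
    is_stale_py content = is_stale_py_alt content := by
  have hmain : is_stale_py content = true ↔ is_stale_py_alt content = true := by
    rw [is_stale_py_iff,
        show is_stale_py_alt content = altGo (PySem.Chars.lower content.toList) from rfl,
        altGo_iff]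
    constructor
    · rintro ⟨m, hm, hinf⟩
      obtain ⟨j, hpre⟩ := (PySem.Chars.exists_prefix_drop_iff_isIn m.toList _).mpr
        ((PySem.Chars.isIn_iff_infix _ _).mpr hinf)
      exact ⟨j, m.toList, by rw [altMarkers_eq]; exact List.mem_map_of_mem hm, hpre⟩
    · rintro ⟨j, m, hm, hpre⟩
      rw [altMarkers_eq] at hm
      obtain ⟨m', hm', rfl⟩ := List.mem_map.mp hm
      exact ⟨m', hm', (PySem.Chars.isIn_iff_infix _ _).mp
        ((PySem.Chars.exists_prefix_drop_iff_isIn _ _).mp ⟨j, hpre⟩)⟩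
  cases hA : is_stale_py content <;> cases hB : is_stale_py_alt content <;> simp_all

-- ===== VERDICT (by name: the statement is the Claim_ definition above) =====
theorem is_stale_py_spec : Claim_equal_is_stale_py := by
  intro content _
  unfold Spec_is_stale_py
  exact is_stale_py_eq_alt content
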